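-- pv_equiv track=rewrite | github.com/rbraith/sleep-target | tools/fix-sections.py | clearExistingSectionHeaders
-- ===== SOURCE A (Python) =====
-- SECTION_HEADER_LINE_THINGY = "//*********************************************************"
--
-- def isExistingHeaderStart(line:str)->bool:
--     return line.strip().startswith(SECTION_HEADER_LINE_THINGY)
--
-- def clearExistingSectionHeaders(lines:list)->list:
--     updatedLines = []
--
--     i = 0
--     linesLength = len(lines)
--     while i < linesLength:
--         line = lines[i]
--
--         if isExistingHeaderStart(line):
--             # skip existing header
--             i += 3
--             # fix for bug where fix-sections keeps adding more blank lines on iterative calls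
--             # (basically, remove instances of blank lines added from processSectionRules())
--             if i < linesLength and not lines[i].isspace():
--                 updatedLines.append(lines[i])
--         else:
--             # retain all other lines
--             updatedLines.append(line)
--
--         i += 1
--
--     return updatedLines
-- ===== SOURCE B (Python) =====
-- SECTION_HEADER_LINE_THINGY = "//*********************************************************"
--
-- def isExistingHeaderStart(line: str) -> bool:
--     return line.strip().startswith(SECTION_HEADER_LINE_THINGY)
--
-- def clearExistingSectionHeaders(lines: list) -> list:
--     # pass 1: mark the indices belonging to existing header blocks
--     n = len(lines)
--     remove = []
--     i = 0
--     while i < n: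
--         if isExistingHeaderStart(lines[i]):
--             remove.extend((i, i + 1, i + 2))
--             if i + 3 < n and lines[i + 3].isspace():
--                 remove.append(i + 3)
--             i += 4
--         else:
--             i += 1
--     # pass 2: rebuild the kept lines in order
--     return [line for idx, line in enumerate(lines) if idx not in remove]
-- ===== Notes on version B (the rewrite author's own statement) =====
-- stated objective: alternative
-- what changed: B splits the work into two passes: a marking pass that records the indices of header blocks (and of the following blank line) in a remove list, then a rebuild pass that keeps exactly the lines whose index was not marked, instead of A's single loop that interleaves skipping and appending.
import Mathlib
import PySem

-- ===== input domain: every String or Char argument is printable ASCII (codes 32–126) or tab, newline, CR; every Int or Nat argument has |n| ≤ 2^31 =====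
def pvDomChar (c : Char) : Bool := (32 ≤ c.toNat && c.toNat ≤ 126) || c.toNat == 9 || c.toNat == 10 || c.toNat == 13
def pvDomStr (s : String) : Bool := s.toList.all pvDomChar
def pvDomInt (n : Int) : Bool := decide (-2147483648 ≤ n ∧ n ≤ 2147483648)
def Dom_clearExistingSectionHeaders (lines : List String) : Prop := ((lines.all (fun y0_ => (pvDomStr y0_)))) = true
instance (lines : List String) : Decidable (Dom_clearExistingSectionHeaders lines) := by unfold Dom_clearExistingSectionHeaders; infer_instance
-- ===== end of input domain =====

-- B separates the work into two passes — mark the indices of header blocks, then filter by index —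
-- instead of A's interleaved skip/append loop (objective: alternative; same cost).

def pvSectionHeaderLineThingy : String := "//*********************************************************"

def pvIsExistingHeaderStart (line : String) : Bool :=
  PySem.Str.startswith (PySem.Str.strip line) pvSectionHeaderLineThingy

-- ===== PORT A =====
-- A's while-loop, one step per iteration; `i += 3` + conditional append + `i += 1` = resume at i+4.
def pvGoA (lines : List String) (i : Nat) : List String :=
  if _h : i < lines.length then
    let line := lines.getD i ""
    if pvIsExistingHeaderStart line then
      let rest := pvGoA lines (i + 4)
      if i + 3 < lines.length ∧ ¬ (PySem.Str.strIsspace (lines.getD (i + 3) "") = true) then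
        lines.getD (i + 3) "" :: rest
      else
        rest
    else
      line :: pvGoA lines (i + 1)
  else
    []
termination_by lines.length - i

def clearExistingSectionHeaders (lines : List String) : List String :=
  pvGoA lines 0

-- ===== PORT B =====
-- pass 1 of Source B: the marking loop, building the `remove` list of indices
def pvMarkB (lines : List String) (i : Nat) : List Nat :=
  if _h : i < lines.length then
    if pvIsExistingHeaderStart (lines.getD i "") then
      i :: (i + 1) :: (i + 2) ::
        ((if i + 3 < lines.length ∧ PySem.Str.strIsspace (lines.getD (i + 3) "") = true then
            [i + 3] else []) ++ pvMarkB lines (i + 4))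
    else
      pvMarkB lines (i + 1)
  else
    []
termination_by lines.length - i

def clearExistingSectionHeaders_alt (lines : List String) : List String :=
  let remove := pvMarkB lines 0
  ((lines.zipIdx).filter (fun p => ¬ p.2 ∈ remove)).map Prod.fst

-- ===== PRECONDITION & SPEC =====
def Spec_clearExistingSectionHeaders (lines : List String) (out : List String) : Prop := out = clearExistingSectionHeaders_alt lines
instance (lines : List String) (out : List String) : Decidable (Spec_clearExistingSectionHeaders lines out) := by unfold Spec_clearExistingSectionHeaders; infer_instance

-- ===== CLAIM (what is proved, stated in full; the proofs are below) =====
def Claim_equal_clearExistingSectionHeaders : Prop := ∀ (lines : List String), Dom_clearExistingSectionHeaders lines → Spec_clearExistingSectionHeaders lines (clearExistingSectionHeaders lines)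

-- ===== LEMMAS AND PROOFS =====

-- pvKeep l k R: the elements of l whose index (starting at k) is not in R
def pvKeep (l : List String) (k : Nat) (R : List Nat) : List String :=
  match l with
  | [] => []
  | x :: xs => (if k ∈ R then [] else [x]) ++ pvKeep xs (k + 1) R

theorem pvKeep_filter (l : List String) (k : Nat) (R : List Nat) :
    ((l.zipIdx k).filter (fun p => ¬ p.2 ∈ R)).map Prod.fst = pvKeep l k R := by
  induction l generalizing k with
  | nil => simp [pvKeep]
  | cons x xs ih =>
      simp only [List.zipIdx_cons, List.filter_cons, pvKeep, decide_not]
      simp only [decide_not] at ih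
      by_cases h : k ∈ R <;> simp [h, ih]

theorem pvMarkB_ge (n : Nat) (lines : List String) (i : Nat) (hn : lines.length ≤ i + n) :
    ∀ j ∈ pvMarkB lines i, i ≤ j := by
  induction n generalizing i with
  | zero =>
      rw [pvMarkB, dif_neg (by omega)]
      simp
  | succ n ih =>
      intro j hj
      rw [pvMarkB] at hj
      by_cases hi : i < lines.length
      · rw [dif_pos hi] at hj
        by_cases hh : pvIsExistingHeaderStart (lines.getD i "") = true
        · rw [if_pos hh] at hj
          simp only [List.mem_cons, List.mem_append] at hj
          rcases hj with h | h | h | h | h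
          · omega
          · omega
          · omega
          · split at h <;> simp at h; omega
          · have := ih (i + 4) (by omega) j h; omega
        · rw [if_neg hh] at hj
          have := ih (i + 1) (by omega) j hj; omega
      · rw [dif_neg hi] at hj; simp at hj

theorem pvKeep_congr (l : List String) (k : Nat) (R R' : List Nat)
    (h : ∀ j, k ≤ j → (j ∈ R ↔ j ∈ R')) : pvKeep l k R = pvKeep l k R' := by
  induction l generalizing k with
  | nil => rfl
  | cons x xs ih =>
      simp only [pvKeep]
      rw [ih (k + 1) (fun j hj => h j (by omega))]
      by_cases hk : k ∈ R
      · rw [if_pos hk, if_pos ((h k le_rfl).1 hk)]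
      · rw [if_neg hk, if_neg (fun hk' => hk ((h k le_rfl).2 hk'))]

theorem pvKeep_all_in (l : List String) (k : Nat) (R : List Nat)
    (h : ∀ j, k ≤ j → j < k + l.length → j ∈ R) : pvKeep l k R = [] := by
  induction l generalizing k with
  | nil => rfl
  | cons x xs ih =>
      simp only [pvKeep, List.length_cons] at *
      rw [if_pos (h k le_rfl (by omega)), ih (k + 1) (fun j h1 h2 => h j (by omega) (by omega))]
      rfl

theorem pvDrop_cons (lines : List String) (i : Nat) (h : i < lines.length) :
    lines.drop i = lines.getD i "" :: lines.drop (i + 1) := by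
  rw [List.getD_eq_getElem lines "" h]
  exact List.drop_eq_getElem_cons h

theorem pvGoA_stop (lines : List String) (i : Nat) (h : ¬ i < lines.length) :
    pvGoA lines i = [] := by
  rw [pvGoA, dif_neg h]

theorem pvGoA_keep (lines : List String) (i : Nat) (hi : i < lines.length)
    (hh : ¬ pvIsExistingHeaderStart (lines.getD i "") = true) :
    pvGoA lines i = lines.getD i "" :: pvGoA lines (i + 1) := by
  rw [pvGoA, dif_pos hi]
  show (if pvIsExistingHeaderStart (lines.getD i "") = true then
      if i + 3 < lines.length ∧ ¬ PySem.Str.strIsspace (lines.getD (i + 3) "") = true then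
        lines.getD (i + 3) "" :: pvGoA lines (i + 4)
      else pvGoA lines (i + 4)
    else lines.getD i "" :: pvGoA lines (i + 1)) = _
  rw [if_neg hh]

theorem pvGoA_header (lines : List String) (i : Nat) (hi : i < lines.length)
    (hh : pvIsExistingHeaderStart (lines.getD i "") = true) :
    pvGoA lines i =
      if i + 3 < lines.length ∧ ¬ PySem.Str.strIsspace (lines.getD (i + 3) "") = true then
        lines.getD (i + 3) "" :: pvGoA lines (i + 4)
      else
        pvGoA lines (i + 4) := by
  rw [pvGoA, dif_pos hi]
  show (if pvIsExistingHeaderStart (lines.getD i "") = true then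
      if i + 3 < lines.length ∧ ¬ PySem.Str.strIsspace (lines.getD (i + 3) "") = true then
        lines.getD (i + 3) "" :: pvGoA lines (i + 4)
      else pvGoA lines (i + 4)
    else lines.getD i "" :: pvGoA lines (i + 1)) = _
  rw [if_pos hh]

theorem pvMainAux (n : Nat) (lines : List String) (i : Nat) (hn : lines.length ≤ i + n) :
    pvKeep (lines.drop i) i (pvMarkB lines i) = pvGoA lines i := by
  induction n generalizing i with
  | zero =>
      rw [pvGoA_stop lines i (by omega), pvMarkB, dif_neg (by omega),
        List.drop_eq_nil_of_le (by omega)]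
      rfl
  | succ n ih =>
      by_cases hi : i < lines.length
      · by_cases hh : pvIsExistingHeaderStart (lines.getD i "") = true
        · -- header case
          rw [pvGoA_header lines i hi hh, pvMarkB, dif_pos hi, if_pos hh]
          have hge : ∀ j ∈ pvMarkB lines (i + 4), i + 4 ≤ j :=
            pvMarkB_ge lines.length lines (i + 4) (by omega)
          by_cases h3 : i + 3 < lines.length
          · have hcong : ∀ j, i + 4 ≤ j →
                (j ∈ i :: (i + 1) :: (i + 2) ::
                  ((if i + 3 < lines.length ∧ PySem.Str.strIsspace (lines.getD (i + 3) "") = true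
                    then [i + 3] else []) ++ pvMarkB lines (i + 4))
                 ↔ j ∈ pvMarkB lines (i + 4)) := by
              intro j hj
              simp only [List.mem_cons, List.mem_append]
              constructor
              · rintro (h | h | h | h | h)
                · omega
                · omega
                · omega
                · split at h <;> simp at h; omega
                · exact h
              · intro h; exact Or.inr (Or.inr (Or.inr (Or.inr h)))
            rw [pvDrop_cons lines i (by omega), pvDrop_cons lines (i + 1) (by omega),
              pvDrop_cons lines (i + 2) (by omega), pvDrop_cons lines (i + 3) h3]
            set R : List Nat := i :: (i + 1) :: (i + 2) ::
              ((if i + 3 < lines.length ∧ PySem.Str.strIsspace (lines.getD (i + 3) "") = true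
                then [i + 3] else []) ++ pvMarkB lines (i + 4)) with hR
            have hrec : pvKeep (lines.drop (i + 4)) (i + 4) R = pvGoA lines (i + 4) := by
              rw [hR, pvKeep_congr _ _ _ (pvMarkB lines (i + 4)) hcong, ih (i + 4) (by omega)]
            have m0 : i ∈ R := by rw [hR]; exact List.mem_cons_self
            have m1 : i + 1 ∈ R := by
              rw [hR]; exact List.mem_cons_of_mem _ List.mem_cons_self
            have m2 : i + 1 + 1 ∈ R := by
              rw [show i + 1 + 1 = i + 2 from by omega, hR]
              exact List.mem_cons_of_mem _ (List.mem_cons_of_mem _ List.mem_cons_self)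
            have e3 : i + 1 + 1 + 1 = i + 3 := by omega
            have e4 : i + 1 + 1 + 1 + 1 = i + 4 := by omega
            have e4' : i + 3 + 1 = i + 4 := by omega
            simp only [pvKeep]
            rw [if_pos m0, if_pos m1, if_pos m2, e3, e4, e4']
            by_cases hsp : PySem.Str.strIsspace (lines.getD (i + 3) "") = true
            · have m3 : i + 3 ∈ R := by
                rw [hR, if_pos ⟨h3, hsp⟩]
                exact List.mem_cons_of_mem _ (List.mem_cons_of_mem _
                  (List.mem_cons_of_mem _ (List.mem_append_left _ List.mem_cons_self)))
              rw [if_pos m3,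
                if_neg (show ¬ (i + 3 < lines.length ∧
                  ¬ PySem.Str.strIsspace (lines.getD (i + 3) "") = true) from
                  fun h => h.2 hsp),
                hrec]
              simp
            · have m3 : ¬ i + 3 ∈ R := by
                rw [hR, if_neg (show ¬ (i + 3 < lines.length ∧
                  PySem.Str.strIsspace (lines.getD (i + 3) "") = true) from
                  fun h => hsp h.2)]
                simp only [List.mem_cons, List.nil_append]
                push Not
                exact ⟨by omega, by omega, by omega, fun h => by have := hge _ h; omega⟩
              rw [if_neg m3,
                if_pos (show i + 3 < lines.length ∧
                  ¬ PySem.Str.strIsspace (lines.getD (i + 3) "") = true from ⟨h3, hsp⟩),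
                hrec]
              simp
          · rw [if_neg (show ¬ (i + 3 < lines.length ∧
                ¬ PySem.Str.strIsspace (lines.getD (i + 3) "") = true) from
                fun h => h3 h.1)]
            rw [pvKeep_all_in _ _ _ (by
              intro j h1 h2
              have hlen : (lines.drop i).length = lines.length - i := List.length_drop
              simp only [List.mem_cons]
              have : j = i ∨ j = i + 1 ∨ j = i + 2 := by omega
              rcases this with h | h | h
              exacts [Or.inl h, Or.inr (Or.inl h), Or.inr (Or.inr (Or.inl h))])]
            rw [pvGoA_stop lines (i + 4) (by omega)]
        · -- non-header case
          rw [pvGoA_keep lines i hi hh, pvMarkB, dif_pos hi, if_neg hh]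
          rw [pvDrop_cons lines i hi]
          simp only [pvKeep]
          rw [if_neg (fun h => by
            have := pvMarkB_ge n lines (i + 1) (by omega) i h; omega)]
          rw [ih (i + 1) (by omega)]
          rfl
      · rw [pvGoA_stop lines i hi, pvMarkB, dif_neg hi,
          List.drop_eq_nil_of_le (by omega)]
        rfl

-- ===== VERDICT (by name: the statement is the Claim_ definition above) =====
theorem clearExistingSectionHeaders_spec : Claim_equal_clearExistingSectionHeaders := by
  intro lines _
  unfold Spec_clearExistingSectionHeaders clearExistingSectionHeaders clearExistingSectionHeaders_alt
  rw [pvKeep_filter]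
  exact (pvMainAux lines.length lines 0 (by omega)).symm
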